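-- pv_equiv track=rewrite | github.com/Gabkings/alogorithms-practise | recursion/bfs_algorithms/traversing_algorithms/blind75/amazon_lint/FormMinimumNumber.py | validPermutationsDISequence
-- ===== SOURCE A (Python) =====
-- def validPermutationsDISequence(str):
--     '''
--     You are given a string s of length n where s[i] is either:
--
--     'D' means decreasing, or
--     'I' means increasing.
--     A permutation perm of n + 1 integers of all the integers in the range [0, n] is called a valid permutation if for all valid i:
--
--     If s[i] == 'D', then perm[i] > perm[i + 1], and
--     If s[i] == 'I', then perm[i] < perm[i + 1].
--     Return the number of valid permutations perm. Since the answer may be large, return it modulo 109 + 7.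
--     '''
--     myStore = [1]
--     for index, val in enumerate(str):
--         if val == 0:
--             continue
--         temp = []
--
--         for i in range(index + 2):
--             if val == "I":
--                 curr = sum(myStore[i:])
--             else:
--                 curr = sum(myStore[:i])
--             temp.append(curr)
--         myStore = temp
--     return sum(myStore) % (10**9 + 7)
-- ===== SOURCE B (Python) =====
-- def validPermutationsDISequence(str):
--     dp = [1]
--     for ch in str:
--         new = []
--         if ch == 'I':
--             run = sum(dp)
--             for x in dp:
--                 new.append(run)
--                 run -= x
--         else:
--             run = 0
--             for x in dp:
--                 new.append(run)
--                 run += x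
--         new.append(run)
--         dp = new
--     return sum(dp) % (10**9 + 7)
-- ===== Notes on version B (the rewrite author's own statement) =====
-- stated objective: faster
-- what changed: Each DP layer is built in one forward pass with a running prefix/suffix-sum accumulator instead of re-summing a list slice for every cell.
import Mathlib
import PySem

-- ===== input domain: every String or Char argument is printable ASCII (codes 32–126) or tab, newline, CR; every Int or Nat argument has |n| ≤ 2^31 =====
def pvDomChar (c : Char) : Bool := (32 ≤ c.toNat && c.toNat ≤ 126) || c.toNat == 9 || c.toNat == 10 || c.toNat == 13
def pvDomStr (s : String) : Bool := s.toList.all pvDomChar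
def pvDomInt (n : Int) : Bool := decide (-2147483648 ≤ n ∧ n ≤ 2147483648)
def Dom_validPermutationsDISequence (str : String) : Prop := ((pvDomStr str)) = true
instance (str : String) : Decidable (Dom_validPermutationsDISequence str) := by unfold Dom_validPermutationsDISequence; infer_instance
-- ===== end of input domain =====

-- B builds each DP layer in one forward pass with a running prefix/suffix-sum accumulator
-- instead of re-summing a slice per cell (asymptotically faster; measured by the check).


-- ===== PORT A =====
-- literal port: enumerate + inner range loop summing slices; `if val == 0: continue`
-- compares a one-character string with the int 0 and is always False, hence a no-op.
def validPermutationsDISequence (str : String) : Int :=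
  let myStore := (PySem.List.enumerate str.toList 0).foldl (fun myStore iv =>
    (PySem.List.pyRange 0 (iv.1 + 2) 1).foldl (fun temp i =>
      temp ++ [if iv.2 == 'I' then (PySem.List.slice myStore (some i) none).sum
               else (PySem.List.slice myStore none (some i)).sum]) []) [1]
  PySem.Int.mod myStore.sum (10 ^ 9 + 7)

-- ===== PORT B =====
-- one forward pass per layer, carrying the running sum `run` (Source B's loop)
def diStep (dp : List Int) (ch : Char) : List Int :=
  if ch == 'I' then
    let r := dp.foldl (fun (p : List Int × Int) x => (p.1 ++ [p.2], p.2 - x)) (([] : List Int), dp.sum)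
    r.1 ++ [r.2]
  else
    let r := dp.foldl (fun (p : List Int × Int) x => (p.1 ++ [p.2], p.2 + x)) (([] : List Int), 0)
    r.1 ++ [r.2]

def validPermutationsDISequence_alt (str : String) : Int :=
  PySem.Int.mod (str.toList.foldl diStep [1]).sum (10 ^ 9 + 7)

-- ===== PRECONDITION & SPEC =====
def Spec_validPermutationsDISequence (str : String) (out : Int) : Prop := out = validPermutationsDISequence_alt str
instance (str : String) (out : Int) : Decidable (Spec_validPermutationsDISequence str out) := by unfold Spec_validPermutationsDISequence; infer_instance

-- ===== CLAIM (what is proved, stated in full; the proofs are below) =====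
def Claim_equal_validPermutationsDISequence : Prop := ∀ (str : String), Dom_validPermutationsDISequence str → Spec_validPermutationsDISequence str (validPermutationsDISequence str)

-- ===== LEMMAS AND PROOFS =====

-- append-fold is a map
theorem foldl_append_map {α β : Type} (l : List α) (acc : List β) (f : α → β) :
    l.foldl (fun t i => t ++ [f i]) acc = acc ++ l.map f := by
  induction l generalizing acc with
  | nil => simp
  | cons x t ih => simp [List.foldl, ih]

-- B's D-branch fold: prefix sums
theorem foldB_pre (l : List Int) (acc : List Int) (s : Int) :
    l.foldl (fun (p : List Int × Int) x => (p.1 ++ [p.2], p.2 + x)) (acc, s)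
      = (acc ++ (List.range l.length).map (fun k => s + (l.take k).sum), s + l.sum) := by
  induction l generalizing acc s with
  | nil => simp
  | cons x t ih =>
    simp only [List.foldl, ih, List.length_cons, List.range_succ_eq_map, List.map_cons,
      List.map_map, Prod.mk.injEq]
    refine ⟨?_, ?_⟩
    · simp [Function.comp_def, List.append_assoc]
      intro a _; ring
    · simp [List.sum_cons]; ring

-- B's I-branch fold: running difference
theorem foldB_suf (l : List Int) (acc : List Int) (s : Int) :
    l.foldl (fun (p : List Int × Int) x => (p.1 ++ [p.2], p.2 - x)) (acc, s)
      = (acc ++ (List.range l.length).map (fun k => s - (l.take k).sum), s - l.sum) := by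
  induction l generalizing acc s with
  | nil => simp
  | cons x t ih =>
    simp only [List.foldl, ih, List.length_cons, List.range_succ_eq_map, List.map_cons,
      List.map_map, Prod.mk.injEq]
    refine ⟨?_, ?_⟩
    · simp [Function.comp_def, List.append_assoc]
      intro a _; ring
    · simp [List.sum_cons]; ring

theorem diStep_eq (dp : List Int) (ch : Char) :
    diStep dp ch = (List.range (dp.length + 1)).map
      (fun k => if ch == 'I' then (dp.drop k).sum else (dp.take k).sum) := by
  unfold diStep
  by_cases h : ch == 'I' <;> simp only [h, Bool.false_eq_true, if_true, if_false]
  · rw [foldB_suf]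
    rw [List.range_succ, List.map_append]
    simp only [List.nil_append, List.map_cons, List.map_nil]
    congr 1
    · apply List.map_congr_left; intro k hk
      have := List.sum_take_add_sum_drop dp k
      omega
    · simp
  · rw [foldB_pre]
    rw [List.range_succ, List.map_append]
    simp [List.take_of_length_le]

-- A's inner loop equals B's one-pass layer when dp has length n+1
theorem stepA_eq (dp : List Int) (ch : Char) (n : Nat) (h : dp.length = n + 1) :
    (PySem.List.pyRange 0 ((n : Int) + 2) 1).foldl (fun temp i =>
        temp ++ [if ch == 'I' then (PySem.List.slice dp (some i) none).sum
                 else (PySem.List.slice dp none (some i)).sum]) []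
      = diStep dp ch := by
  rw [foldl_append_map, diStep_eq, h, PySem.List.pyRange_one]
  have ht : (((n : Int) + 2 - 0)).toNat = n + 2 := by omega
  rw [ht, List.map_map, List.nil_append, show n + 1 + 1 = n + 2 from rfl]
  apply List.map_congr_left
  intro k _
  simp [PySem.List.slice_from_natCast, PySem.List.slice_to_natCast]

theorem length_diStep (dp : List Int) (ch : Char) : (diStep dp ch).length = dp.length + 1 := by
  rw [diStep_eq]; simp

theorem outer_eq (l : List Char) : ∀ (n : Nat) (dp : List Int), dp.length = n + 1 →
    (PySem.List.enumerate l (n : Int)).foldl (fun myStore iv =>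
      (PySem.List.pyRange 0 (iv.1 + 2) 1).foldl (fun temp i =>
        temp ++ [if iv.2 == 'I' then (PySem.List.slice myStore (some i) none).sum
                 else (PySem.List.slice myStore none (some i)).sum]) []) dp
      = l.foldl diStep dp := by
  induction l with
  | nil => intro n dp _; simp [PySem.List.enumerate_nil]
  | cons c t ih =>
    intro n dp h
    rw [PySem.List.enumerate_cons, List.foldl_cons, List.foldl_cons]
    rw [stepA_eq dp c n h]
    have : ((n : Int) + 1) = (((n + 1 : Nat)) : Int) := by push_cast; ring
    rw [this, ih (n + 1) (diStep dp c) (by rw [length_diStep, h])]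

-- ===== VERDICT (by name: the statement is the Claim_ definition above) =====
theorem validPermutationsDISequence_spec : Claim_equal_validPermutationsDISequence := by
  intro s _
  unfold Spec_validPermutationsDISequence validPermutationsDISequence validPermutationsDISequence_alt
  have h := outer_eq s.toList 0 [1] rfl
  simp only [Nat.cast_zero] at h
  rw [h]
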